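-- pv_equiv track=rewrite | github.com/kh277/BOJ | 백준/Gold/5378. Hex/Hex.py | solve
-- ===== SOURCE A (Python) =====
-- from collections import deque
--
-- dx = [0, 1, -1, 1, -1, 0]
--
-- dy = [-1, -1, 0, 0, 1, 1]
--
-- def BFS(N, grid, visited, start, end, curT):
--     q = deque()
--     for i in start:
--         q.append(i)
--         visited[i[0]][i[1]] = 1
--
--     while q:
--         cur = q.popleft()
--         curY, curX = cur
--
--         if cur in end:
--             return True
--
--         for i in range(6):
--             nextX = curX + dx[i]
--             nextY = curY + dy[i]
--
--             if 0 <= nextX < N and 0 <= nextY < N and visited[nextY][nextX] == 0 and grid[nextY][nextX] == curT: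
--                 q.append((nextY, nextX))
--                 visited[nextY][nextX] = 1
--
--     return False
--
-- def solve(N, grid):
--     blackS = []
--     blackE = set()
--     whiteS = []
--     whiteE = set()
--     for i in range(N):
--         if grid[0][i] == 'B':
--             blackS.append((0, i))
--         if grid[N-1][i] == 'B':
--             blackE.add((N-1, i))
--         if grid[i][N-1] == 'W':
--             whiteS.append((i, N-1))
--         if grid[i][0] == 'W':
--             whiteE.add((i, 0))
--
--     visited = [[0] * N for _ in range(N)]
--     if BFS(N, grid, visited, blackS, blackE, 'B') == True:
--         return "Black wins"
--     elif BFS(N, grid, visited, whiteS, whiteE, 'W') == True: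
--         return "White wins"
--     return "Not finished"
-- ===== SOURCE B (Python) =====
-- # Round-based set-saturation flood fill (no queue, no visited matrix):
-- # grow the reachable set until it stops changing, then test end-side membership.
--
-- OFFS = ((-1, 0), (-1, 1), (0, -1), (0, 1), (1, -1), (1, 0))  # (dy, dx), same 6 hex neighbors
--
-- def solve(N, grid):
--     def connected(starts, ends, color):
--         reach = set(starts)
--         for _ in range(N * N):
--             nxt = set(reach)
--             for (y, x) in reach:
--                 for (dy, dx) in OFFS:
--                     ny, nx = y + dy, x + dx
--                     if 0 <= ny < N and 0 <= nx < N and grid[ny][nx] == color: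
--                         nxt.add((ny, nx))
--             if len(nxt) == len(reach):
--                 break
--             reach = nxt
--         return any(e in reach for e in ends)
--
--     blackS = [(0, i) for i in range(N) if grid[0][i] == 'B']
--     blackE = [(N - 1, i) for i in range(N) if grid[N - 1][i] == 'B']
--     whiteS = [(i, N - 1) for i in range(N) if grid[i][N - 1] == 'W']
--     whiteE = [(i, 0) for i in range(N) if grid[i][0] == 'W']
--     if connected(blackS, blackE, 'B'):
--         return "Black wins"
--     if connected(whiteS, whiteE, 'W'):
--         return "White wins"
--     return "Not finished"
-- ===== Notes on version B (the rewrite author's own statement) =====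
-- stated objective: alternative
-- what changed: Replaced the queue-plus-visited-matrix BFS flood fill with a round-based set-saturation fixpoint: grow the set of reachable cells (same 6 hex offsets) until it stops changing, then test membership of the far-side cells; black is still checked before white.
-- outside the precondition, e.g. on solve(2, [['B']]): A raises IndexError, B raises IndexError
import Mathlib
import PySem

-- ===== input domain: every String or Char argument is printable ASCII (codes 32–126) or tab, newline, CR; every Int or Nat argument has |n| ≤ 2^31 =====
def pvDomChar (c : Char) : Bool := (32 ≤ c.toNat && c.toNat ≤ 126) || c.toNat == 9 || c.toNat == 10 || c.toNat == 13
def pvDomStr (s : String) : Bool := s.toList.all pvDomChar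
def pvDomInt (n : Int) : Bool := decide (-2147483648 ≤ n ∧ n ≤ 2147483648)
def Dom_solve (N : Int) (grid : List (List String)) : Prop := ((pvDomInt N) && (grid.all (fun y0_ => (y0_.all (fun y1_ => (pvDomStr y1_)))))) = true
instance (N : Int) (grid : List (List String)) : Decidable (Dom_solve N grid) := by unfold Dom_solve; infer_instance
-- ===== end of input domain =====

-- B replaces the queue-and-visited-matrix BFS with a round-based set-saturation
-- flood fill (grow the reachable set to a fixpoint, then test end membership);
-- objective: alternative. Equivalence of the RETURN VALUE is proved below.

-- ===== PORT A =====
-- grid[y][x] / visited[y][x]; the pyGetD defaults are never reached under Pre_solve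
def gridGet (grid : List (List String)) (y x : Int) : String :=
  PySem.List.pyGetD (PySem.List.pyGetD grid y []) x ""

def visGet (visited : List (List Int)) (y x : Int) : Int :=
  PySem.List.pyGetD (PySem.List.pyGetD visited y []) x 0

-- visited[y][x] = 1 (indices are always in range where A executes this)
def markA (visited : List (List Int)) (y x : Int) : List (List Int) :=
  PySem.List.pySetD visited y (PySem.List.pySetD (PySem.List.pyGetD visited y []) x 1)

def dxA : List Int := [0, 1, -1, 1, -1, 0]
def dyA : List Int := [-1, -1, 0, 0, 1, 1]

-- body of A's 'for i in range(6)' loop: state = (queue, visited)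
def bfsStep (N : Int) (grid : List (List String)) (curT : String) (curY curX : Int)
    (st : List (Int × Int) × List (List Int)) (i : Int) :
    List (Int × Int) × List (List Int) :=
  let nextX := curX + PySem.List.pyGetD dxA i 0
  let nextY := curY + PySem.List.pyGetD dyA i 0
  if 0 ≤ nextX ∧ nextX < N ∧ 0 ≤ nextY ∧ nextY < N ∧ visGet st.2 nextY nextX = 0 ∧
      gridGet grid nextY nextX = curT then
    (st.1 ++ [(nextY, nextX)], markA st.2 nextY nextX)
  else st

-- A's 'while q' loop; fuel only totalizes the recursion (proved sufficient below)
def bfsLoop (N : Int) (grid : List (List String)) (curT : String)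
    (ends : PySem.Set (Int × Int)) :
    Nat → List (Int × Int) → List (List Int) → Bool × List (List Int)
  | 0, _, visited => (false, visited)
  | _ + 1, [], visited => (false, visited)
  | fuel + 1, cur :: rest, visited =>
    if PySem.Set.contains ends cur then (true, visited)
    else
      let st := (PySem.List.pyRange 0 6 1).foldl (bfsStep N grid curT cur.1 cur.2) (rest, visited)
      bfsLoop N grid curT ends fuel st.1 st.2

-- def BFS(N, grid, visited, start, end, curT); returns (result, mutated visited)
def bfsA (N : Int) (grid : List (List String)) (visited : List (List Int))
    (starts : List (Int × Int)) (ends : PySem.Set (Int × Int)) (curT : String) :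
    Bool × List (List Int) :=
  let visited := starts.foldl (fun v c => markA v c.1 c.2) visited
  bfsLoop N grid curT ends (2 * N.toNat * N.toNat + N.toNat + 1) starts visited

def solve (N : Int) (grid : List (List String)) : String :=
  let z := (PySem.List.pyRange 0 N 1).foldl
    (fun (st : List (Int × Int) × PySem.Set (Int × Int) × List (Int × Int) × PySem.Set (Int × Int)) i =>
      (if gridGet grid 0 i == "B" then st.1 ++ [((0 : Int), i)] else st.1,
       if gridGet grid (N - 1) i == "B" then PySem.Set.add st.2.1 (N - 1, i) else st.2.1,
       if gridGet grid i (N - 1) == "W" then st.2.2.1 ++ [(i, N - 1)] else st.2.2.1,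
       if gridGet grid i 0 == "W" then PySem.Set.add st.2.2.2 (i, (0 : Int)) else st.2.2.2))
    ([], [], [], [])
  let visited := List.replicate N.toNat (List.replicate N.toNat (0 : Int))
  let r1 := bfsA N grid visited z.1 z.2.1 "B"
  if r1.1 = true then "Black wins"
  else if (bfsA N grid r1.2 z.2.2.1 z.2.2.2 "W").1 = true then "White wins"
  else "Not finished"

-- ===== PORT B =====
def OFFS : List (Int × Int) := [(-1, 0), (-1, 1), (0, -1), (0, 1), (1, -1), (1, 0)]

-- one saturation round: nxt = set(reach) plus every in-range same-colored neighbor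
def growB (N : Int) (grid : List (List String)) (color : String)
    (reach : PySem.Set (Int × Int)) : PySem.Set (Int × Int) :=
  reach.foldl
    (fun nxt c =>
      OFFS.foldl
        (fun nxt d =>
          let ny := c.1 + d.1
          let nx := c.2 + d.2
          if 0 ≤ ny ∧ ny < N ∧ 0 ≤ nx ∧ nx < N ∧ gridGet grid ny nx = color then
            PySem.Set.add nxt (ny, nx)
          else nxt)
        nxt)
    (PySem.Set.ofList reach)

-- 'for _ in range(N*N): … if len(nxt) == len(reach): break'
def satB (N : Int) (grid : List (List String)) (color : String) :
    Nat → PySem.Set (Int × Int) → PySem.Set (Int × Int)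
  | 0, reach => reach
  | k + 1, reach =>
    let nxt := growB N grid color reach
    if PySem.Set.len nxt = PySem.Set.len reach then reach
    else satB N grid color k nxt

def connectedB (N : Int) (grid : List (List String)) (starts ends : List (Int × Int))
    (color : String) : Bool :=
  let reach := satB N grid color (N * N).toNat (PySem.Set.ofList starts)
  ends.any fun e => PySem.Set.contains reach e

def solve_alt (N : Int) (grid : List (List String)) : String :=
  let idxs := PySem.List.pyRange 0 N 1
  let blackS := (idxs.filter fun i => gridGet grid 0 i == "B").map fun i => ((0 : Int), i)
  let blackE := (idxs.filter fun i => gridGet grid (N - 1) i == "B").map fun i => (N - 1, i)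
  let whiteS := (idxs.filter fun i => gridGet grid i (N - 1) == "W").map fun i => (i, N - 1)
  let whiteE := (idxs.filter fun i => gridGet grid i 0 == "W").map fun i => (i, (0 : Int))
  if connectedB N grid blackS blackE "B" then "Black wins"
  else if connectedB N grid whiteS whiteE "W" then "White wins"
  else "Not finished"

-- ===== PRECONDITION & SPEC =====
-- Pre_ excludes exactly the shapes on which Python A raises IndexError:
-- N ≥ 1 but the grid has fewer than N rows, or one of the first N rows has fewer than N cells.
def Pre_solve (N : Int) (grid : List (List String)) : Prop :=
  N ≤ 0 ∨ (N ≤ grid.length ∧ ∀ row ∈ grid.take N.toNat, N ≤ row.length)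
instance (N : Int) (grid : List (List String)) : Decidable (Pre_solve N grid) := by
  unfold Pre_solve; infer_instance

def pvWitness_solve : Int × List (List String) := (2, [["B", "W"], ["W", "B"]])

def Spec_solve (N : Int) (grid : List (List String)) (out : String) : Prop := out = solve_alt N grid
instance (N : Int) (grid : List (List String)) (out : String) : Decidable (Spec_solve N grid out) := by unfold Spec_solve; infer_instance

-- ===== CLAIM (what is proved, stated in full; the proofs are below) =====
def Claim_equal_solve : Prop := ∀ (N : Int) (grid : List (List String)), Dom_solve N grid → Pre_solve N grid → Spec_solve N grid (solve N grid)

-- ===== LEMMAS AND PROOFS =====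

def ShapeV (N : Int) (v : List (List Int)) : Prop :=
  v.length = N.toNat ∧ ∀ r ∈ v, r.length = N.toNat

def InR (N : Int) (c : Int × Int) : Prop :=
  0 ≤ c.1 ∧ c.1 < N ∧ 0 ≤ c.2 ∧ c.2 < N

def countZeros (v : List (List Int)) : Nat := (v.map fun r => r.count 0).sum

theorem getD_set_if {α : Type} (l : List α) (n k : Nat) (a d : α) :
    (l.set n a).getD k d = if k = n ∧ n < l.length then a else l.getD k d := by
  simp [List.getD, List.getElem?_set]
  split_ifs with h1 h2 h3 <;> simp_all

theorem pyGetD_set_nonneg {α : Type} (l : List α) (n : Nat) (a : α) (i : Int) (d : α)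
    (hi : 0 ≤ i) :
    PySem.List.pyGetD (l.set n a) i d =
      if i = (n : Int) ∧ n < l.length then a else PySem.List.pyGetD l i d := by
  have h1 : i = ((i.toNat : Nat) : Int) := (Int.toNat_of_nonneg hi).symm
  rw [h1, PySem.List.pyGetD_natCast, PySem.List.pyGetD_natCast, getD_set_if]
  congr 1
  simp only [eq_iff_iff]
  constructor <;> (intro h; exact ⟨by omega, h.2⟩)

theorem markA_eq (N : Int) (v : List (List Int)) (y x : Int)
    (h : InR N (y, x)) (hyl : y.toNat < v.length) :
    markA v y x = v.set y.toNat ((v[y.toNat]).set x.toNat 1) := by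
  obtain ⟨hy0, hyN, hx0, hxN⟩ := h
  simp only at hy0 hyN hx0 hxN
  unfold markA
  rw [PySem.List.pyGetD_eq_getElem v [] hy0 (by omega),
    PySem.List.pySetD_of_nonneg _ _ hx0, PySem.List.pySetD_of_nonneg _ _ hy0]

theorem shape_markA (N : Int) (v : List (List Int)) (y x : Int) (hs : ShapeV N v)
    (h : InR N (y, x)) : ShapeV N (markA v y x) := by
  have hyl : y.toNat < v.length := by
    obtain ⟨hy0, hyN, _, _⟩ := h; obtain ⟨h1, _⟩ := hs; simp only at hy0 hyN; omega
  rw [markA_eq N v y x h hyl]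
  obtain ⟨h1, h2⟩ := hs
  refine ⟨by simpa using h1, ?_⟩
  intro r hr
  rcases List.mem_or_eq_of_mem_set hr with hm | he
  · exact h2 r hm
  · subst he; simpa using h2 _ (List.getElem_mem hyl)

theorem visGet_markA (N : Int) (v : List (List Int)) (y x : Int) (hs : ShapeV N v)
    (h : InR N (y, x)) (y' x' : Int) (hy' : 0 ≤ y') (hx' : 0 ≤ x') :
    visGet (markA v y x) y' x' = if y' = y ∧ x' = x then 1 else visGet v y' x' := by
  obtain ⟨hy0, hyN, hx0, hxN⟩ := h
  simp only at hy0 hyN hx0 hxN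
  have hyl : y.toNat < v.length := by obtain ⟨h1, _⟩ := hs; omega
  have hrow : (v[y.toNat]).length = N.toNat := hs.2 _ (List.getElem_mem hyl)
  have hxr : x.toNat < (v[y.toNat]).length := by omega
  rw [markA_eq N v y x ⟨hy0, hyN, hx0, hxN⟩ hyl]
  unfold visGet
  rw [pyGetD_set_nonneg v y.toNat _ y' [] hy']
  by_cases hcy : y' = y
  · subst hcy
    have hthis : y' = ((y'.toNat : Nat) : Int) := by omega
    rw [if_pos ⟨hthis, hyl⟩]
    rw [pyGetD_set_nonneg _ x.toNat _ x' 0 hx']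
    by_cases hcx : x' = x
    · rw [if_pos ⟨by omega, hxr⟩, if_pos ⟨rfl, hcx⟩]
    · rw [if_neg (by intro hc; exact hcx (by omega)), if_neg (by tauto)]
      rw [PySem.List.pyGetD_eq_getElem v [] hy' (by omega)]
  · rw [if_neg (by intro hc; exact hcy (by omega)), if_neg (by tauto)]

theorem count_set_one (l : List Int) (n : Nat) :
    (l.set n 1).count 0 ≤ l.count 0 := by
  induction l generalizing n with
  | nil => simp
  | cons a t ih =>
    cases n with
    | zero => simp [List.count_cons]
    | succ m => simp [List.count_cons]; have := ih m; omega

theorem count_set_one_eq (l : List Int) (n : Nat) (hn : n < l.length) (h0 : l[n] = 0) :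
    (l.set n 1).count 0 + 1 = l.count 0 := by
  induction l generalizing n with
  | nil => simp at hn
  | cons a t ih =>
    cases n with
    | zero => simp_all
    | succ m =>
      simp at hn h0
      have := ih m hn h0
      simp [List.count_cons]
      omega

theorem sum_set_nat (l : List Nat) (n : Nat) (a : Nat) (hn : n < l.length) :
    (l.set n a).sum + l[n] = l.sum + a := by
  induction l generalizing n with
  | nil => simp at hn
  | cons b t ih =>
    cases n with
    | zero => simp; omega
    | succ m => simp at hn; have := ih m hn; simp; omega

theorem countZeros_markA_le (N : Int) (v : List (List Int)) (y x : Int) (hs : ShapeV N v)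
    (h : InR N (y, x)) : countZeros (markA v y x) ≤ countZeros v := by
  have hyl : y.toNat < v.length := by
    obtain ⟨h1, _⟩ := hs; obtain ⟨hy0, hyN, _, _⟩ := h; simp only at hy0 hyN; omega
  rw [markA_eq N v y x h hyl]
  unfold countZeros
  rw [List.map_set]
  have hml : y.toNat < (v.map fun r => r.count 0).length := by simpa using hyl
  have hsum := sum_set_nat (v.map fun r => r.count 0) y.toNat
    (((v[y.toNat]).set x.toNat 1).count 0) hml
  have hget : (v.map fun r => r.count 0)[y.toNat] = (v[y.toNat]).count 0 := by
    simp
  have hle := count_set_one (v[y.toNat]) x.toNat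
  rw [hget] at hsum
  omega

theorem countZeros_markA_eq (N : Int) (v : List (List Int)) (y x : Int) (hs : ShapeV N v)
    (h : InR N (y, x)) (h0 : visGet v y x = 0) :
    countZeros (markA v y x) + 1 = countZeros v := by
  obtain ⟨hy0, hyN, hx0, hxN⟩ := h
  simp only at hy0 hyN hx0 hxN
  have hyl : y.toNat < v.length := by obtain ⟨h1, _⟩ := hs; omega
  have hrow : (v[y.toNat]).length = N.toNat := hs.2 _ (List.getElem_mem hyl)
  have hxr : x.toNat < (v[y.toNat]).length := by omega
  have hv0 : (v[y.toNat])[x.toNat] = 0 := by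
    unfold visGet at h0
    rw [PySem.List.pyGetD_eq_getElem v [] hy0 (by omega)] at h0
    rw [PySem.List.pyGetD_eq_getElem _ _ hx0 (by omega)] at h0
    exact h0
  rw [markA_eq N v y x ⟨hy0, hyN, hx0, hxN⟩ hyl]
  unfold countZeros
  rw [List.map_set]
  have hml : y.toNat < (v.map fun r => r.count 0).length := by simpa using hyl
  have hsum := sum_set_nat (v.map fun r => r.count 0) y.toNat
    (((v[y.toNat]).set x.toNat 1).count 0) hml
  have hget : (v.map fun r => r.count 0)[y.toNat] = (v[y.toNat]).count 0 := by simp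
  have heq := count_set_one_eq (v[y.toNat]) x.toNat hxr hv0
  rw [hget] at hsum
  omega

theorem countZeros_le (N : Int) (v : List (List Int)) (hs : ShapeV N v) :
    countZeros v ≤ N.toNat * N.toNat := by
  obtain ⟨h1, h2⟩ := hs
  unfold countZeros
  calc (v.map fun r => r.count 0).sum ≤ (v.map fun _ => N.toNat).sum := by
        apply List.sum_le_sum
        intro r hr
        calc r.count 0 ≤ r.length := List.count_le_length
          _ = N.toNat := h2 r hr
    _ = N.toNat * N.toNat := by
        rw [List.map_const', List.sum_replicate, smul_eq_mul, h1]

inductive ReachP (N : Int) (grid : List (List String)) (col : String)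
    (starts : List (Int × Int)) : (Int × Int) → Prop where
  | base {c : Int × Int} (h : c ∈ starts) : ReachP N grid col starts c
  | step {c : Int × Int} (d : Int × Int) (hc : ReachP N grid col starts c)
      (o : Int × Int) (ho : o ∈ OFFS) (he : d = (c.1 + o.1, c.2 + o.2))
      (hr : InR N d) (hcol : gridGet grid d.1 d.2 = col) : ReachP N grid col starts d

def offOf (i : Int) : Int × Int := (PySem.List.pyGetD dyA i 0, PySem.List.pyGetD dxA i 0)

theorem offOf_mem (i : Int) (h : i ∈ PySem.List.pyRange 0 6 1) : offOf i ∈ OFFS := by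
  rw [PySem.List.mem_pyRange_one] at h
  obtain ⟨h1, h2⟩ := h
  interval_cases i <;> decide

theorem offs_covered (o : Int × Int) (ho : o ∈ OFFS) :
    ∃ i ∈ PySem.List.pyRange 0 6 1, offOf i = o := by
  fin_cases ho
  · exact ⟨0, by decide, by decide⟩
  · exact ⟨1, by decide, by decide⟩
  · exact ⟨2, by decide, by decide⟩
  · exact ⟨3, by decide, by decide⟩
  · exact ⟨4, by decide, by decide⟩
  · exact ⟨5, by decide, by decide⟩

theorem fold_step (N : Int) (grid : List (List String)) (col : String) (y x : Int) :
    ∀ (l : List Int), (∀ i ∈ l, offOf i ∈ OFFS) →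
    ∀ (q : List (Int × Int)) (v : List (List Int)), ShapeV N v →
    ∃ t,
      (l.foldl (bfsStep N grid col y x) (q, v)).1 = q ++ t ∧
      ShapeV N (l.foldl (bfsStep N grid col y x) (q, v)).2 ∧
      (∀ c : Int × Int, 0 ≤ c.1 → 0 ≤ c.2 →
        (visGet (l.foldl (bfsStep N grid col y x) (q, v)).2 c.1 c.2 ≠ 0 ↔
          visGet v c.1 c.2 ≠ 0 ∨ c ∈ t)) ∧
      (∀ c ∈ t, InR N c ∧ gridGet grid c.1 c.2 = col ∧ visGet v c.1 c.2 = 0 ∧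
        ∃ o ∈ OFFS, c = (y + o.1, x + o.2)) ∧
      2 * countZeros (l.foldl (bfsStep N grid col y x) (q, v)).2 + t.length ≤
        2 * countZeros v ∧
      (∀ i ∈ l, InR N (y + (offOf i).1, x + (offOf i).2) →
        gridGet grid (y + (offOf i).1) (x + (offOf i).2) = col →
        visGet (l.foldl (bfsStep N grid col y x) (q, v)).2 (y + (offOf i).1) (x + (offOf i).2) ≠ 0) := by
  intro l
  induction l with
  | nil =>
    intro _ q v hs
    exact ⟨[], by simp, hs, by simp, by simp, by simp, by simp⟩
  | cons i l' ih =>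
    intro hl q v hs
    rw [List.foldl_cons]
    by_cases hg : 0 ≤ x + PySem.List.pyGetD dxA i 0 ∧ x + PySem.List.pyGetD dxA i 0 < N ∧
        0 ≤ y + PySem.List.pyGetD dyA i 0 ∧ y + PySem.List.pyGetD dyA i 0 < N ∧
        visGet v (y + PySem.List.pyGetD dyA i 0) (x + PySem.List.pyGetD dxA i 0) = 0 ∧
        gridGet grid (y + PySem.List.pyGetD dyA i 0) (x + PySem.List.pyGetD dxA i 0) = col
    · -- guard true: append d and mark it
      obtain ⟨hx0, hxN, hy0, hyN, hv0, hcol⟩ := hg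
      set dY := y + PySem.List.pyGetD dyA i 0 with hdY
      set dX := x + PySem.List.pyGetD dxA i 0 with hdX
      have hstep : bfsStep N grid col y x (q, v) i = (q ++ [(dY, dX)], markA v dY dX) := by
        unfold bfsStep
        rw [if_pos ⟨hx0, hxN, hy0, hyN, hv0, hcol⟩]
      rw [hstep]
      have hInD : InR N (dY, dX) := ⟨hy0, hyN, hx0, hxN⟩
      have hs' : ShapeV N (markA v dY dX) := shape_markA N v dY dX hs hInD
      obtain ⟨t', h1, h2, h3, h4, h5, h6⟩ := ih (fun j hj => hl j (List.mem_cons_of_mem _ hj))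
        (q ++ [(dY, dX)]) (markA v dY dX) hs'
      refine ⟨(dY, dX) :: t', ?_, h2, ?_, ?_, ?_, ?_⟩
      · rw [h1, List.append_assoc]; rfl
      · intro c hc1 hc2
        rw [h3 c hc1 hc2]
        rw [visGet_markA N v dY dX hs hInD c.1 c.2 hc1 hc2]
        by_cases hcd : c = (dY, dX)
        · subst hcd; simp
        · have : ¬(c.1 = dY ∧ c.2 = dX) := by
            intro ⟨ha, hb⟩; exact hcd (Prod.ext ha hb)
          rw [if_neg this]
          constructor
          · rintro (h | h)
            · exact Or.inl h
            · exact Or.inr (List.mem_cons_of_mem _ h)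
          · rintro (h | h)
            · exact Or.inl h
            · rcases List.mem_cons.mp h with he | hm
              · exact absurd he hcd
              · exact Or.inr hm
      · intro c hc
        rcases List.mem_cons.mp hc with he | hm
        · subst he
          refine ⟨hInD, hcol, hv0, ⟨offOf i, hl i (List.mem_cons_self), ?_⟩⟩
          simp [offOf, hdY, hdX]
        · obtain ⟨ha, hb, hcv, hd⟩ := h4 c hm
          refine ⟨ha, hb, ?_, hd⟩
          rw [visGet_markA N v dY dX hs hInD c.1 c.2 ha.1 ha.2.2.1] at hcv
          by_cases hcd : c.1 = dY ∧ c.2 = dX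
          · rw [if_pos hcd] at hcv; omega
          · rw [if_neg hcd] at hcv; exact hcv
      · have hcz := countZeros_markA_eq N v dY dX hs hInD hv0
        simp only [List.length_cons]
        omega
      · intro j hj
        rcases List.mem_cons.mp hj with he | hm
        · subst he
          simp only [offOf]
          rw [← hdY, ← hdX]
          intro _ _
          refine (h3 (dY, dX) (by omega) (by omega)).mpr (Or.inl ?_)
          have hm1 := visGet_markA N v dY dX hs hInD dY dX (by omega) (by omega)
          rw [if_pos ⟨rfl, rfl⟩] at hm1
          simp [hm1]
        · exact h6 j hm
    · -- guard false
      have hstep : bfsStep N grid col y x (q, v) i = (q, v) := by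
        unfold bfsStep
        rw [if_neg hg]
      rw [hstep]
      obtain ⟨t', h1, h2, h3, h4, h5, h6⟩ := ih (fun j hj => hl j (List.mem_cons_of_mem _ hj)) q v hs
      refine ⟨t', h1, h2, h3, h4, h5, ?_⟩
      intro j hj
      rcases List.mem_cons.mp hj with he | hm
      · subst he
        simp only [offOf]
        intro hInD hcolD
        obtain ⟨hy0, hyN, hx0, hxN⟩ := hInD
        simp only at hy0 hyN hx0 hxN
        have hvne : visGet v (y + PySem.List.pyGetD dyA j 0) (x + PySem.List.pyGetD dxA j 0) ≠ 0 := by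
          intro hv0
          exact hg ⟨hx0, hxN, hy0, hyN, hv0, hcolD⟩
        exact (h3 (y + PySem.List.pyGetD dyA j 0, x + PySem.List.pyGetD dxA j 0)
          (by omega) (by omega)).mpr (Or.inl hvne)
      · exact h6 j hm

def newmD (N : Int) (v₀ v : List (List Int)) (c : Int × Int) : Prop :=
  InR N c ∧ visGet v c.1 c.2 ≠ 0 ∧ visGet v₀ c.1 c.2 = 0

def BfsInv (N : Int) (grid : List (List String)) (col : String) (starts : List (Int × Int))
    (ends : PySem.Set (Int × Int)) (v₀ : List (List Int)) (q : List (Int × Int))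
    (v : List (List Int)) : Prop :=
  ShapeV N v ∧
  (∀ c ∈ q, newmD N v₀ v c) ∧
  (∀ c, newmD N v₀ v c → ReachP N grid col starts c) ∧
  (∀ c, newmD N v₀ v c → c ∉ q →
    c ∉ ends ∧ ∀ o ∈ OFFS, InR N (c.1 + o.1, c.2 + o.2) →
      gridGet grid (c.1 + o.1) (c.2 + o.2) = col → newmD N v₀ v (c.1 + o.1, c.2 + o.2)) ∧
  (∀ c ∈ starts, newmD N v₀ v c) ∧
  (∀ c, newmD N v₀ v c → c ∈ starts ∨ gridGet grid c.1 c.2 = col)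

theorem reach_sub (N : Int) (grid : List (List String)) (col : String)
    (starts : List (Int × Int)) (P : Int × Int → Prop)
    (hbase : ∀ c ∈ starts, P c)
    (hstep : ∀ c, P c → ∀ o ∈ OFFS, InR N (c.1 + o.1, c.2 + o.2) →
      gridGet grid (c.1 + o.1) (c.2 + o.2) = col → P (c.1 + o.1, c.2 + o.2)) :
    ∀ c, ReachP N grid col starts c → P c := by
  intro c h
  induction h with
  | base h => exact hbase _ h
  | step d hc o ho he hr hcol ih =>
    subst he; exact hstep _ ih o ho hr hcol

theorem bfsLoop_correct (N : Int) (grid : List (List String)) (col : String)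
    (starts : List (Int × Int)) (ends : PySem.Set (Int × Int)) (v₀ : List (List Int))
    (hclean : ∀ c : Int × Int, InR N c → gridGet grid c.1 c.2 = col → visGet v₀ c.1 c.2 = 0) :
    ∀ (fuel : Nat) (q : List (Int × Int)) (v : List (List Int)),
      BfsInv N grid col starts ends v₀ q v →
      2 * countZeros v + q.length < fuel →
      ((bfsLoop N grid col ends fuel q v).1 = true ↔
        ∃ e ∈ (ends : List (Int × Int)), ReachP N grid col starts e) ∧
      ShapeV N (bfsLoop N grid col ends fuel q v).2 ∧
      (∀ c : Int × Int, InR N c → visGet (bfsLoop N grid col ends fuel q v).2 c.1 c.2 ≠ 0 →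
        visGet v₀ c.1 c.2 ≠ 0 ∨ c ∈ starts ∨ gridGet grid c.1 c.2 = col) := by
  intro fuel
  induction fuel with
  | zero => intro q v _ hm; omega
  | succ fuel ih =>
    intro q v hInv hm
    obtain ⟨hS1, hS2, hS3, hS4, hS5, hS6⟩ := hInv
    have hside : ∀ (w : List (List Int)), (∀ c, newmD N v₀ w c → c ∈ starts ∨ gridGet grid c.1 c.2 = col) →
        ∀ c : Int × Int, InR N c → visGet w c.1 c.2 ≠ 0 →
        visGet v₀ c.1 c.2 ≠ 0 ∨ c ∈ starts ∨ gridGet grid c.1 c.2 = col := by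
      intro w h7 c hIn hne
      by_cases h0 : visGet v₀ c.1 c.2 = 0
      · exact Or.inr (h7 c ⟨hIn, hne, h0⟩)
      · exact Or.inl h0
    cases q with
    | nil =>
      simp only [bfsLoop]
      refine ⟨?_, hS1, hside v hS6⟩
      simp only [Bool.false_eq_true, false_iff]
      rintro ⟨e, hee, hre⟩
      have hnewm : newmD N v₀ v e := by
        refine reach_sub N grid col starts (newmD N v₀ v) hS5 ?_ e hre
        intro c hc o ho hIn hcol
        exact (hS4 c hc (by simp)).2 o ho hIn hcol
      exact (hS4 e hnewm (by simp)).1 hee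
    | cons cur rest =>
      cases hend : PySem.Set.contains ends cur with
      | true =>
        simp only [bfsLoop, hend, if_true]
        refine ⟨?_, hS1, hside v hS6⟩
        simp only [true_iff]
        exact ⟨cur, (PySem.Set.contains_iff ends cur).mp hend,
          hS3 cur (hS2 cur List.mem_cons_self)⟩
      | false =>
        have hcurm : newmD N v₀ v cur := hS2 cur List.mem_cons_self
        obtain ⟨t, hq1, hsh, hiff, htc, hcz, hcov⟩ :=
          fold_step N grid col cur.1 cur.2 (PySem.List.pyRange 0 6 1) offOf_mem rest v hS1
        set r := (PySem.List.pyRange 0 6 1).foldl (bfsStep N grid col cur.1 cur.2) (rest, v) with hr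
        have hrun : bfsLoop N grid col ends (fuel + 1) (cur :: rest) v =
            bfsLoop N grid col ends fuel r.1 r.2 := by
          rw [bfsLoop, hend]
          simp only [Bool.false_eq_true, if_false]
          rfl
        rw [hrun, hq1]
        have hnew : ∀ c, newmD N v₀ r.2 c ↔ newmD N v₀ v c ∨ c ∈ t := by
          intro c
          constructor
          · rintro ⟨hIn, hne, h0⟩
            rcases (hiff c hIn.1 hIn.2.2.1).mp hne with h | h
            · exact Or.inl ⟨hIn, h, h0⟩
            · exact Or.inr h
          · rintro (⟨hIn, hne, h0⟩ | ht)
            · exact ⟨hIn, (hiff c hIn.1 hIn.2.2.1).mpr (Or.inl hne), h0⟩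
            · obtain ⟨hIn, hcol, _, _⟩ := htc c ht
              exact ⟨hIn, (hiff c hIn.1 hIn.2.2.1).mpr (Or.inr ht), hclean c hIn hcol⟩
        have hInv' : BfsInv N grid col starts ends v₀ (rest ++ t) r.2 := by
          refine ⟨hsh, ?_, ?_, ?_, ?_, ?_⟩
          · intro c hc
            rcases List.mem_append.mp hc with h | h
            · exact (hnew c).mpr (Or.inl (hS2 c (List.mem_cons_of_mem _ h)))
            · exact (hnew c).mpr (Or.inr h)
          · intro c hc
            rcases (hnew c).mp hc with h | h
            · exact hS3 c h
            · obtain ⟨hIn, hcol, _, o, ho, he⟩ := htc c h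
              exact ReachP.step c (hS3 cur hcurm) o ho he hIn hcol
          · intro c hc hcq
            have hcr : c ∉ rest := fun h => hcq (List.mem_append.mpr (Or.inl h))
            have hct : c ∉ t := fun h => hcq (List.mem_append.mpr (Or.inr h))
            have hcold : newmD N v₀ v c := by
              rcases (hnew c).mp hc with h | h
              · exact h
              · exact absurd h hct
            by_cases hcc : c = cur
            · subst hcc
              constructor
              · intro hce
                rw [← PySem.Set.contains_iff ends c] at hce
                rw [hend] at hce
                exact Bool.false_ne_true hce
              · intro o ho hIn hcol
                obtain ⟨i, hi, hoi⟩ := offs_covered o ho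
                have := hcov i hi
                rw [hoi] at this
                exact ⟨hIn, this hIn hcol, hclean _ hIn hcol⟩
            · have hq : c ∉ cur :: rest := by
                intro h
                rcases List.mem_cons.mp h with h | h
                · exact hcc h
                · exact hcr h
              obtain ⟨he, hcl⟩ := hS4 c hcold hq
              refine ⟨he, ?_⟩
              intro o ho hIn hcol
              exact (hnew _).mpr (Or.inl (hcl o ho hIn hcol))
          · intro c hc
            exact (hnew c).mpr (Or.inl (hS5 c hc))
          · intro c hc
            rcases (hnew c).mp hc with h | h
            · exact hS6 c h
            · exact Or.inr (htc c h).2.1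
        have hm' : 2 * countZeros r.2 + (rest ++ t).length < fuel := by
          rw [List.length_append]
          simp only [List.length_cons] at hm
          omega
        exact ih (rest ++ t) r.2 hInv' hm'

theorem mark_phase (N : Int) :
    ∀ (starts : List (Int × Int)) (v : List (List Int)), (∀ c ∈ starts, InR N c) → ShapeV N v →
    ShapeV N (starts.foldl (fun v c => markA v c.1 c.2) v) ∧
    (∀ c : Int × Int, 0 ≤ c.1 → 0 ≤ c.2 →
      (visGet (starts.foldl (fun v c => markA v c.1 c.2) v) c.1 c.2 ≠ 0 ↔
        visGet v c.1 c.2 ≠ 0 ∨ c ∈ starts)) ∧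
    countZeros (starts.foldl (fun v c => markA v c.1 c.2) v) ≤ countZeros v := by
  intro starts
  induction starts with
  | nil => intro v _ hs; exact ⟨hs, by simp, le_refl _⟩
  | cons s rest ih =>
    intro v hIn hs
    have hsIn : InR N (s.1, s.2) := by simpa using hIn s List.mem_cons_self
    have hs1 : ShapeV N (markA v s.1 s.2) := shape_markA N v s.1 s.2 hs hsIn
    obtain ⟨ha, hb, hc⟩ := ih (markA v s.1 s.2) (fun c hcm => hIn c (List.mem_cons_of_mem _ hcm)) hs1
    rw [List.foldl_cons]
    refine ⟨ha, ?_, le_trans hc (countZeros_markA_le N v s.1 s.2 hs hsIn)⟩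
    intro c h1 h2
    rw [hb c h1 h2, visGet_markA N v s.1 s.2 hs hsIn c.1 c.2 h1 h2]
    by_cases hcs : c = s
    · subst hcs
      simp
    · have hne : ¬(c.1 = s.1 ∧ c.2 = s.2) := by
        intro ⟨u1, u2⟩; exact hcs (Prod.ext u1 u2)
      rw [if_neg hne]
      constructor
      · rintro (h | h)
        · exact Or.inl h
        · exact Or.inr (List.mem_cons_of_mem _ h)
      · rintro (h | h)
        · exact Or.inl h
        · rcases List.mem_cons.mp h with he | hm
          · exact absurd he hcs
          · exact Or.inr hm

theorem bfsA_correct (N : Int) (grid : List (List String)) (col : String)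
    (starts : List (Int × Int)) (ends : PySem.Set (Int × Int)) (v₀ : List (List Int))
    (hs : ShapeV N v₀)
    (hclean : ∀ c : Int × Int, InR N c → gridGet grid c.1 c.2 = col → visGet v₀ c.1 c.2 = 0)
    (hstarts : ∀ c ∈ starts, InR N c)
    (hstartcol : ∀ c ∈ starts, gridGet grid c.1 c.2 = col)
    (hlen : starts.length ≤ N.toNat) :
    ((bfsA N grid v₀ starts ends col).1 = true ↔
      ∃ e ∈ (ends : List (Int × Int)), ReachP N grid col starts e) ∧
    ShapeV N (bfsA N grid v₀ starts ends col).2 ∧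
    (∀ c : Int × Int, InR N c → visGet (bfsA N grid v₀ starts ends col).2 c.1 c.2 ≠ 0 →
      visGet v₀ c.1 c.2 ≠ 0 ∨ c ∈ starts ∨ gridGet grid c.1 c.2 = col) := by
  obtain ⟨hsh, hmk, hcz⟩ := mark_phase N starts v₀ hstarts hs
  set v₁ := starts.foldl (fun v c => markA v c.1 c.2) v₀ with hv₁
  have hnewm : ∀ c, newmD N v₀ v₁ c ↔ c ∈ starts := by
    intro c
    constructor
    · rintro ⟨hIn, hne, h0⟩
      rcases (hmk c hIn.1 hIn.2.2.1).mp hne with h | h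
      · exact absurd h0 h
      · exact h
    · intro hcm
      have hIn := hstarts c hcm
      exact ⟨hIn, (hmk c hIn.1 hIn.2.2.1).mpr (Or.inr hcm),
        hclean c hIn (hstartcol c hcm)⟩
  have hInv : BfsInv N grid col starts ends v₀ starts v₁ := by
    refine ⟨hsh, ?_, ?_, ?_, ?_, ?_⟩
    · intro c hc; exact (hnewm c).mpr hc
    · intro c hc; exact ReachP.base ((hnewm c).mp hc)
    · intro c hc hcq; exact absurd ((hnewm c).mp hc) hcq
    · intro c hc; exact (hnewm c).mpr hc
    · intro c hc; exact Or.inl ((hnewm c).mp hc)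
  have hfuel : 2 * countZeros v₁ + starts.length < 2 * N.toNat * N.toNat + N.toNat + 1 := by
    have h1 := countZeros_le N v₀ hs
    have hperm : 2 * N.toNat * N.toNat = 2 * (N.toNat * N.toNat) := by ring
    rw [hperm]
    omega
  have := bfsLoop_correct N grid col starts ends v₀ hclean
    (2 * N.toNat * N.toNat + N.toNat + 1) starts v₁ hInv hfuel
  exact this

def AdjP (N : Int) (grid : List (List String)) (col : String) (p e : Int × Int) : Prop :=
  ∃ o ∈ OFFS, e = (p.1 + o.1, p.2 + o.2) ∧ InR N e ∧ gridGet grid e.1 e.2 = col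

theorem inner_fold (N : Int) (grid : List (List String)) (col : String) (c : Int × Int) :
    ∀ (os : List (Int × Int)) (nxt : PySem.Set (Int × Int)), nxt.Nodup →
    (∀ e, e ∈ os.foldl
        (fun nxt d =>
          let ny := c.1 + d.1
          let nx := c.2 + d.2
          if 0 ≤ ny ∧ ny < N ∧ 0 ≤ nx ∧ nx < N ∧ gridGet grid ny nx = col then
            PySem.Set.add nxt (ny, nx)
          else nxt) nxt ↔
      e ∈ nxt ∨ ∃ o ∈ os, e = (c.1 + o.1, c.2 + o.2) ∧ InR N e ∧ gridGet grid e.1 e.2 = col) ∧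
    (os.foldl
        (fun nxt d =>
          let ny := c.1 + d.1
          let nx := c.2 + d.2
          if 0 ≤ ny ∧ ny < N ∧ 0 ≤ nx ∧ nx < N ∧ gridGet grid ny nx = col then
            PySem.Set.add nxt (ny, nx)
          else nxt) nxt).Nodup := by
  intro os
  induction os with
  | nil => intro nxt hn; exact ⟨by simp, hn⟩
  | cons o os ih =>
    intro nxt hn
    rw [List.foldl_cons]
    by_cases hg : 0 ≤ c.1 + o.1 ∧ c.1 + o.1 < N ∧ 0 ≤ c.2 + o.2 ∧ c.2 + o.2 < N ∧
        gridGet grid (c.1 + o.1) (c.2 + o.2) = col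
    · simp only [if_pos hg]
      obtain ⟨hm, hnd⟩ := ih (PySem.Set.add nxt (c.1 + o.1, c.2 + o.2)) (PySem.Set.nodup_add _ _ hn)
      refine ⟨?_, hnd⟩
      intro e
      rw [hm e, PySem.Set.mem_add]
      obtain ⟨hg1, hg2, hg3, hg4, hg5⟩ := hg
      constructor
      · rintro ((h | h) | h)
        · exact Or.inl h
        · exact Or.inr ⟨o, List.mem_cons_self, h, ⟨by simp [h, hg1], by simp [h, hg2],
            by simp [h, hg3], by simp [h, hg4]⟩, by simp [h, hg5]⟩
        · obtain ⟨o', ho', rest⟩ := h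
          exact Or.inr ⟨o', List.mem_cons_of_mem _ ho', rest⟩
      · rintro (h | h)
        · exact Or.inl (Or.inl h)
        · obtain ⟨o', ho', he, hIn, hcol⟩ := h
          rcases List.mem_cons.mp ho' with hoe | hom
          · subst hoe
            exact Or.inl (Or.inr he)
          · exact Or.inr ⟨o', hom, he, hIn, hcol⟩
    · simp only [if_neg hg]
      obtain ⟨hm, hnd⟩ := ih nxt hn
      refine ⟨?_, hnd⟩
      intro e
      rw [hm e]
      constructor
      · rintro (h | h)
        · exact Or.inl h
        · obtain ⟨o', ho', rest⟩ := h
          exact Or.inr ⟨o', List.mem_cons_of_mem _ ho', rest⟩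
      · rintro (h | h)
        · exact Or.inl h
        · obtain ⟨o', ho', rest⟩ := h
          rcases List.mem_cons.mp ho' with he | hmm
          · subst he
            obtain ⟨he, hIn, hcol⟩ := rest
            subst he
            exact absurd ⟨hIn.1, hIn.2.1, hIn.2.2.1, hIn.2.2.2, hcol⟩ hg
          · exact Or.inr ⟨o', hmm, rest⟩

theorem outer_fold (N : Int) (grid : List (List String)) (col : String) :
    ∀ (ps : List (Int × Int)) (acc : PySem.Set (Int × Int)), acc.Nodup →
    (∀ e, e ∈ ps.foldl
        (fun nxt c =>
          OFFS.foldl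
            (fun nxt d =>
              let ny := c.1 + d.1
              let nx := c.2 + d.2
              if 0 ≤ ny ∧ ny < N ∧ 0 ≤ nx ∧ nx < N ∧ gridGet grid ny nx = col then
                PySem.Set.add nxt (ny, nx)
              else nxt)
            nxt) acc ↔
      e ∈ acc ∨ ∃ p ∈ ps, AdjP N grid col p e) ∧
    (ps.foldl
        (fun nxt c =>
          OFFS.foldl
            (fun nxt d =>
              let ny := c.1 + d.1
              let nx := c.2 + d.2
              if 0 ≤ ny ∧ ny < N ∧ 0 ≤ nx ∧ nx < N ∧ gridGet grid ny nx = col then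
                PySem.Set.add nxt (ny, nx)
              else nxt)
            nxt) acc).Nodup := by
  intro ps
  induction ps with
  | nil => intro acc hn; exact ⟨by simp, hn⟩
  | cons p ps ih =>
    intro acc hn
    rw [List.foldl_cons]
    obtain ⟨hm1, hn1⟩ := inner_fold N grid col p OFFS acc hn
    obtain ⟨hm2, hn2⟩ := ih _ hn1
    refine ⟨?_, hn2⟩
    intro e
    rw [hm2 e, hm1 e]
    unfold AdjP
    constructor
    · rintro ((h | h) | h)
      · exact Or.inl h
      · exact Or.inr ⟨p, List.mem_cons_self, h⟩
      · obtain ⟨p', hp', hadj⟩ := h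
        exact Or.inr ⟨p', List.mem_cons_of_mem _ hp', hadj⟩
    · rintro (h | h)
      · exact Or.inl (Or.inl h)
      · obtain ⟨p', hp', hadj⟩ := h
        rcases List.mem_cons.mp hp' with hpe | hpm
        · subst hpe
          exact Or.inl (Or.inr hadj)
        · exact Or.inr ⟨p', hpm, hadj⟩

theorem growB_mem (N : Int) (grid : List (List String)) (col : String)
    (reach : PySem.Set (Int × Int)) (hn : reach.Nodup) :
    (∀ e, e ∈ growB N grid col reach ↔ e ∈ reach ∨ ∃ p ∈ reach, AdjP N grid col p e) ∧
    (growB N grid col reach).Nodup := by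
  unfold growB
  rw [PySem.Set.ofList_eq_self_of_nodup reach hn]
  exact outer_fold N grid col reach reach hn

theorem growB_subset (N : Int) (grid : List (List String)) (col : String)
    (reach : PySem.Set (Int × Int)) (hn : reach.Nodup) :
    reach ⊆ growB N grid col reach := by
  intro e he
  exact ((growB_mem N grid col reach hn).1 e).mpr (Or.inl he)

theorem capacity (N : Int) (l : List (Int × Int)) (hn : l.Nodup) (h : ∀ c ∈ l, InR N c) :
    l.length ≤ N.toNat * N.toNat := by
  classical
  have h1 : l.toFinset.card = l.length := List.toFinset_card_of_nodup hn
  have h2 : l.toFinset ⊆ (Finset.Icc (0 : Int) (N - 1)) ×ˢ (Finset.Icc (0 : Int) (N - 1)) := by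
    intro c hc
    rw [List.mem_toFinset] at hc
    obtain ⟨a1, a2, a3, a4⟩ := h c hc
    rw [Finset.mem_product, Finset.mem_Icc, Finset.mem_Icc]
    omega
  have h3 := Finset.card_le_card h2
  rw [Finset.card_product, Int.card_Icc] at h3
  have : (N - 1 + 1 - 0).toNat = N.toNat := by omega
  rw [this] at h3
  omega

theorem satB_invariants (N : Int) (grid : List (List String)) (col : String) :
    ∀ (k : Nat) (reach : PySem.Set (Int × Int)), reach.Nodup → (∀ c ∈ reach, InR N c) →
    (satB N grid col k reach).Nodup ∧ reach ⊆ satB N grid col k reach ∧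
    (∀ c ∈ satB N grid col k reach, InR N c) := by
  intro k
  induction k with
  | zero => intro reach hn hin; exact ⟨hn, fun _ h => h, hin⟩
  | succ k ih =>
    intro reach hn hin
    rw [satB]
    by_cases hl : PySem.Set.len (growB N grid col reach) = PySem.Set.len reach
    · simp only [if_pos hl]
      exact ⟨hn, fun _ h => h, hin⟩
    · simp only [if_neg hl]
      obtain ⟨hgm, hgn⟩ := growB_mem N grid col reach hn
      have hgin : ∀ c ∈ growB N grid col reach, InR N c := by
        intro c hc
        rcases (hgm c).mp hc with h | h
        · exact hin c h
        · obtain ⟨p, _, _, _, _, hIn, _⟩ := h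
          exact hIn
      obtain ⟨ha, hb, hc⟩ := ih (growB N grid col reach) hgn hgin
      exact ⟨ha, fun e he => hb (growB_subset N grid col reach hn he), hc⟩

theorem satB_sound (N : Int) (grid : List (List String)) (col : String)
    (starts : List (Int × Int)) :
    ∀ (k : Nat) (reach : PySem.Set (Int × Int)), reach.Nodup →
    (∀ c ∈ reach, ReachP N grid col starts c) →
    ∀ c ∈ satB N grid col k reach, ReachP N grid col starts c := by
  intro k
  induction k with
  | zero => intro reach _ h; exact h
  | succ k ih =>
    intro reach hn hr
    rw [satB]
    by_cases hl : PySem.Set.len (growB N grid col reach) = PySem.Set.len reach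
    · simp only [if_pos hl]; exact hr
    · simp only [if_neg hl]
      obtain ⟨hgm, hgn⟩ := growB_mem N grid col reach hn
      refine ih (growB N grid col reach) hgn ?_
      intro c hc
      rcases (hgm c).mp hc with h | h
      · exact hr c h
      · obtain ⟨p, hp, o, ho, he, hIn, hcol⟩ := h
        exact ReachP.step c (hr p hp) o ho he hIn hcol

theorem satB_fix (N : Int) (grid : List (List String)) (col : String) :
    ∀ (k : Nat) (reach : PySem.Set (Int × Int)), reach.Nodup → (∀ c ∈ reach, InR N c) →
    N.toNat * N.toNat < k + reach.length →
    ∀ e, e ∈ growB N grid col (satB N grid col k reach) ↔ e ∈ satB N grid col k reach := by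
  intro k
  induction k with
  | zero =>
    intro reach hn hin hcap
    exact absurd (capacity N reach hn hin) (by omega)
  | succ k ih =>
    intro reach hn hin hcap
    rw [satB]
    by_cases hl : PySem.Set.len (growB N grid col reach) = PySem.Set.len reach
    · simp only [if_pos hl]
      have hsub : reach ⊆ growB N grid col reach := growB_subset N grid col reach hn
      have hsp : reach.Subperm (growB N grid col reach) := hn.subperm hsub
      have hleq : (growB N grid col reach).length = reach.length := by
        have : PySem.Set.len (growB N grid col reach) = ((growB N grid col reach).length : Int) := rfl
        have h2 : PySem.Set.len reach = ((reach).length : Int) := rfl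
        rw [this, h2] at hl
        exact_mod_cast hl
      have hperm := hsp.perm_of_length_le (by omega)
      intro e
      exact hperm.mem_iff.symm
    · simp only [if_neg hl]
      obtain ⟨hgm, hgn⟩ := growB_mem N grid col reach hn
      have hgin : ∀ c ∈ growB N grid col reach, InR N c := by
        intro c hc
        rcases (hgm c).mp hc with h | h
        · exact hin c h
        · obtain ⟨p, _, _, _, _, hIn, _⟩ := h
          exact hIn
      have hlen : reach.length < (growB N grid col reach).length := by
        have hle := (hn.subperm (growB_subset N grid col reach hn)).length_le
        rcases lt_or_eq_of_le hle with h | h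
        · exact h
        · exfalso
          apply hl
          show ((growB N grid col reach).length : Int) = (reach.length : Int)
          omega
      exact ih (growB N grid col reach) hgn hgin (by omega)

theorem satB_nil (N : Int) (grid : List (List String)) (col : String) :
    ∀ k, satB N grid col k [] = [] := by
  intro k
  cases k with
  | zero => rfl
  | succ k => rfl

theorem reachP_nil (N : Int) (grid : List (List String)) (col : String) (c : Int × Int)
    (h : ReachP N grid col [] c) : False :=
  reach_sub N grid col [] (fun _ => False) (by simp) (fun _ hc _ _ _ _ => hc) c h

theorem connectedB_iff (N : Int) (grid : List (List String)) (col : String)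
    (starts ends : List (Int × Int)) (hstarts : ∀ c ∈ starts, InR N c) :
    connectedB N grid starts ends col = true ↔
    ∃ e ∈ ends, ReachP N grid col starts e := by
  unfold connectedB
  cases starts with
  | nil =>
    have hofl : PySem.Set.ofList ([] : List (Int × Int)) = [] := rfl
    rw [hofl, satB_nil]
    constructor
    · intro h
      rw [List.any_eq_true] at h
      obtain ⟨e, _, hc⟩ := h
      rw [PySem.Set.contains_iff] at hc
      simp at hc
    · rintro ⟨e, _, hr⟩
      exact absurd hr (fun h => reachP_nil N grid col e h)
  | cons s rest =>
    have hn : (PySem.Set.ofList (s :: rest)).Nodup := PySem.Set.nodup_ofList _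
    have hin : ∀ c ∈ PySem.Set.ofList (s :: rest), InR N c := by
      intro c hc
      exact hstarts c ((PySem.Set.mem_ofList _ c).mp hc)
    have hN : 0 < N := by
      obtain ⟨h1, h2, _, _⟩ := hstarts s List.mem_cons_self
      omega
    have hcap : N.toNat * N.toNat < (N * N).toNat + (PySem.Set.ofList (s :: rest)).length := by
      rw [Int.toNat_mul (by omega) (by omega)]
      have : 0 < (PySem.Set.ofList (s :: rest)).length := by
        rw [PySem.Set.ofList_cons]
        simp
      omega
    obtain ⟨hRn, hRsub, hRin⟩ := satB_invariants N grid col (N * N).toNat _ hn hin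
    have hfix := satB_fix N grid col (N * N).toNat _ hn hin hcap
    have hR : ∀ c, c ∈ satB N grid col (N * N).toNat (PySem.Set.ofList (s :: rest)) ↔
        ReachP N grid col (s :: rest) c := by
      intro c
      constructor
      · intro hc
        refine satB_sound N grid col (s :: rest) (N * N).toNat _ hn ?_ c hc
        intro e he
        exact ReachP.base ((PySem.Set.mem_ofList _ e).mp he)
      · intro hc
        refine reach_sub N grid col (s :: rest)
          (fun e => e ∈ satB N grid col (N * N).toNat (PySem.Set.ofList (s :: rest))) ?_ ?_ c hc
        · intro e he
          exact hRsub ((PySem.Set.mem_ofList _ e).mpr he)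
        · intro e he o ho hIn hcol
          refine (hfix _).mp ?_
          exact ((growB_mem N grid col _ hRn).1 _).mpr
            (Or.inr ⟨e, he, o, ho, rfl, hIn, hcol⟩)
    rw [List.any_eq_true]
    constructor
    · rintro ⟨e, he, hc⟩
      rw [PySem.Set.contains_iff] at hc
      exact ⟨e, he, (hR e).mp hc⟩
    · rintro ⟨e, he, hr⟩
      exact ⟨e, he, (PySem.Set.contains_iff _ e).mpr ((hR e).mpr hr)⟩

theorem setfold_mem (p : Int → Bool) (f : Int → Int × Int) :
    ∀ (l : List Int) (acc : PySem.Set (Int × Int)) (e : Int × Int),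
    e ∈ l.foldl (fun s i => if p i then PySem.Set.add s (f i) else s) acc ↔
      e ∈ acc ∨ ∃ i ∈ l, p i ∧ e = f i := by
  intro l
  induction l with
  | nil => intro acc e; simp
  | cons i l ih =>
    intro acc e
    rw [List.foldl_cons]
    by_cases hp : p i
    · rw [if_pos hp, ih, PySem.Set.mem_add]
      constructor
      · rintro ((h | h) | h)
        · exact Or.inl h
        · exact Or.inr ⟨i, List.mem_cons_self, hp, h⟩
        · obtain ⟨j, hj, hpj, he⟩ := h
          exact Or.inr ⟨j, List.mem_cons_of_mem _ hj, hpj, he⟩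
      · rintro (h | h)
        · exact Or.inl (Or.inl h)
        · obtain ⟨j, hj, hpj, he⟩ := h
          rcases List.mem_cons.mp hj with hje | hjm
          · subst hje
            exact Or.inl (Or.inr he)
          · exact Or.inr ⟨j, hjm, hpj, he⟩
    · rw [if_neg hp, ih]
      constructor
      · rintro (h | h)
        · exact Or.inl h
        · obtain ⟨j, hj, hpj, he⟩ := h
          exact Or.inr ⟨j, List.mem_cons_of_mem _ hj, hpj, he⟩
      · rintro (h | h)
        · exact Or.inl h
        · obtain ⟨j, hj, hpj, he⟩ := h
          rcases List.mem_cons.mp hj with hje | hjm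
          · subst hje
            exact absurd hpj hp
          · exact Or.inr ⟨j, hjm, hpj, he⟩

theorem pyGetD_const {α : Type} (xs : List α) (i : Int) (d : α)
    (h : ∀ a ∈ xs, a = d) : PySem.List.pyGetD xs i d = d := by
  by_cases hr : PySem.Raise.InRange xs.length i
  · exact h _ (PySem.List.pyGetD_mem xs d hr)
  · exact PySem.List.pyGetD_of_none xs i d ((PySem.List.pyGet?_eq_none_iff xs i).mpr hr)

theorem visGet_replicate (n : Nat) (y x : Int) :
    visGet (List.replicate n (List.replicate n (0 : Int))) y x = 0 := by
  unfold visGet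
  by_cases hr : PySem.Raise.InRange (List.replicate n (List.replicate n (0 : Int))).length y
  · have hm := PySem.List.pyGetD_mem (List.replicate n (List.replicate n (0 : Int)))
      ([] : List Int) hr
    have := List.eq_of_mem_replicate hm
    rw [this]
    exact pyGetD_const _ _ _ (fun a ha => List.eq_of_mem_replicate ha)
  · rw [PySem.List.pyGetD_of_none _ _ _ ((PySem.List.pyGet?_eq_none_iff _ y).mpr hr)]
    exact pyGetD_const _ _ _ (by simp)

theorem shape_replicate (N : Int) :
    ShapeV N (List.replicate N.toNat (List.replicate N.toNat (0 : Int))) := by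
  constructor
  · simp
  · intro r hr
    rw [List.eq_of_mem_replicate hr]
    simp

theorem quad_split (N : Int) (grid : List (List String)) :
    ∀ (l : List Int) (a : List (Int × Int)) (b : PySem.Set (Int × Int))
      (c : List (Int × Int)) (d : PySem.Set (Int × Int)),
    l.foldl
      (fun (st : List (Int × Int) × PySem.Set (Int × Int) × List (Int × Int) × PySem.Set (Int × Int)) i =>
        (if gridGet grid 0 i == "B" then st.1 ++ [((0 : Int), i)] else st.1,
         if gridGet grid (N - 1) i == "B" then PySem.Set.add st.2.1 (N - 1, i) else st.2.1,
         if gridGet grid i (N - 1) == "W" then st.2.2.1 ++ [(i, N - 1)] else st.2.2.1,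
         if gridGet grid i 0 == "W" then PySem.Set.add st.2.2.2 (i, (0 : Int)) else st.2.2.2))
      (a, b, c, d) =
    (l.foldl (fun s i => if gridGet grid 0 i == "B" then s ++ [((0 : Int), i)] else s) a,
     l.foldl (fun s i => if gridGet grid (N - 1) i == "B" then PySem.Set.add s (N - 1, i) else s) b,
     l.foldl (fun s i => if gridGet grid i (N - 1) == "W" then s ++ [(i, N - 1)] else s) c,
     l.foldl (fun s i => if gridGet grid i 0 == "W" then PySem.Set.add s (i, (0 : Int)) else s) d) := by
  intro l
  induction l with
  | nil => intro a b c d; rfl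
  | cons j l ih =>
    intro a b c d
    simp only [List.foldl_cons]
    exact ih _ _ _ _

theorem solve_eq (N : Int) (grid : List (List String)) : solve N grid = solve_alt N grid := by
  unfold solve solve_alt
  simp only []
  rw [quad_split]
  simp only []
  rw [PySem.List.foldl_append_if, PySem.List.foldl_append_if, List.nil_append, List.nil_append]
  set idxs := PySem.List.pyRange 0 N 1 with hidxs
  set bS := List.map (fun i => ((0 : Int), i)) (List.filter (fun i => gridGet grid 0 i == "B") idxs) with hbS
  set wS := List.map (fun i => (i, N - 1)) (List.filter (fun i => gridGet grid i (N - 1) == "W") idxs) with hwS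
  set bE := idxs.foldl (fun s i => if gridGet grid (N - 1) i == "B" then PySem.Set.add s (N - 1, i) else s) ([] : PySem.Set (Int × Int)) with hbE
  set wE := idxs.foldl (fun s i => if gridGet grid i 0 == "W" then PySem.Set.add s (i, (0 : Int)) else s) ([] : PySem.Set (Int × Int)) with hwE
  set bEL := List.map (fun i => (N - 1, i)) (List.filter (fun i => gridGet grid (N - 1) i == "B") idxs) with hbEL
  set wEL := List.map (fun i => (i, (0 : Int))) (List.filter (fun i => gridGet grid i 0 == "W") idxs) with hwEL
  have hmemIdx : ∀ i : Int, i ∈ idxs ↔ 0 ≤ i ∧ i < N := by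
    intro i
    rw [hidxs, PySem.List.mem_pyRange_one]
  -- black starts facts
  have hbS_mem : ∀ c ∈ bS, ∃ i, (0 ≤ i ∧ i < N) ∧ gridGet grid 0 i = "B" ∧ c = ((0 : Int), i) := by
    intro c hc
    rw [hbS] at hc
    rw [List.mem_map] at hc
    obtain ⟨i, hi, he⟩ := hc
    rw [List.mem_filter] at hi
    exact ⟨i, (hmemIdx i).mp hi.1, by simpa using hi.2, he.symm⟩
  have hbS_in : ∀ c ∈ bS, InR N c := by
    intro c hc
    obtain ⟨i, ⟨h1, h2⟩, _, he⟩ := hbS_mem c hc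
    subst he
    exact ⟨by omega, by omega, h1, h2⟩
  have hbS_col : ∀ c ∈ bS, gridGet grid c.1 c.2 = "B" := by
    intro c hc
    obtain ⟨i, _, hcol, he⟩ := hbS_mem c hc
    subst he
    exact hcol
  have hbS_len : bS.length ≤ N.toNat := by
    rw [hbS]
    calc (List.map (fun i => ((0 : Int), i)) (List.filter (fun i => gridGet grid 0 i == "B") idxs)).length
        = (List.filter (fun i => gridGet grid 0 i == "B") idxs).length := List.length_map ..
      _ ≤ idxs.length := List.length_filter_le _ _
      _ = N.toNat := by rw [hidxs, PySem.List.length_pyRange_one]; omega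
  -- white starts facts
  have hwS_mem : ∀ c ∈ wS, ∃ i, (0 ≤ i ∧ i < N) ∧ gridGet grid i (N - 1) = "W" ∧ c = (i, N - 1) := by
    intro c hc
    rw [hwS] at hc
    rw [List.mem_map] at hc
    obtain ⟨i, hi, he⟩ := hc
    rw [List.mem_filter] at hi
    exact ⟨i, (hmemIdx i).mp hi.1, by simpa using hi.2, he.symm⟩
  have hwS_in : ∀ c ∈ wS, InR N c := by
    intro c hc
    obtain ⟨i, ⟨h1, h2⟩, _, he⟩ := hwS_mem c hc
    subst he
    exact ⟨h1, h2, by omega, by omega⟩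
  have hwS_col : ∀ c ∈ wS, gridGet grid c.1 c.2 = "W" := by
    intro c hc
    obtain ⟨i, _, hcol, he⟩ := hwS_mem c hc
    subst he
    exact hcol
  have hwS_len : wS.length ≤ N.toNat := by
    rw [hwS]
    calc (List.map (fun i => (i, N - 1)) (List.filter (fun i => gridGet grid i (N - 1) == "W") idxs)).length
        = (List.filter (fun i => gridGet grid i (N - 1) == "W") idxs).length := List.length_map ..
      _ ≤ idxs.length := List.length_filter_le _ _
      _ = N.toNat := by rw [hidxs, PySem.List.length_pyRange_one]; omega
  -- ends membership bridges
  have hbE_mem : ∀ e : Int × Int, e ∈ bE ↔ e ∈ bEL := by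
    intro e
    rw [hbE, hbEL, setfold_mem]
    rw [List.mem_map]
    constructor
    · rintro (h | ⟨i, hi, hp, he⟩)
      · simp at h
      · exact ⟨i, List.mem_filter.mpr ⟨hi, hp⟩, he.symm⟩
    · rintro ⟨i, hi, he⟩
      rw [List.mem_filter] at hi
      exact Or.inr ⟨i, hi.1, hi.2, he.symm⟩
  have hwE_mem : ∀ e : Int × Int, e ∈ wE ↔ e ∈ wEL := by
    intro e
    rw [hwE, hwEL, setfold_mem]
    rw [List.mem_map]
    constructor
    · rintro (h | ⟨i, hi, hp, he⟩)
      · simp at h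
      · exact ⟨i, List.mem_filter.mpr ⟨hi, hp⟩, he.symm⟩
    · rintro ⟨i, hi, he⟩
      rw [List.mem_filter] at hi
      exact Or.inr ⟨i, hi.1, hi.2, he.symm⟩
  -- the black BFS call
  set vis := List.replicate N.toNat (List.replicate N.toNat (0 : Int)) with hvis
  have hcln : ∀ c : Int × Int, InR N c → gridGet grid c.1 c.2 = "B" → visGet vis c.1 c.2 = 0 := by
    intro c _ _
    rw [hvis]
    exact visGet_replicate N.toNat c.1 c.2
  obtain ⟨hAiff, hAsh, hAside⟩ := bfsA_correct N grid "B" bS bE vis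
    (by rw [hvis]; exact shape_replicate N) hcln hbS_in hbS_col hbS_len
  have hBiff := connectedB_iff N grid "B" bS bEL hbS_in
  have hbool1 : (bfsA N grid vis bS bE "B").1 = connectedB N grid bS bEL "B" := by
    cases h1 : (bfsA N grid vis bS bE "B").1
    · cases h2 : connectedB N grid bS bEL "B"
      · rfl
      · exfalso
        obtain ⟨e, he, hr⟩ := hBiff.mp h2
        have := hAiff.mpr ⟨e, (hbE_mem e).mpr he, hr⟩
        rw [h1] at this
        exact Bool.false_ne_true this
    · obtain ⟨e, he, hr⟩ := hAiff.mp h1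
      exact (hBiff.mpr ⟨e, (hbE_mem e).mp he, hr⟩).symm
  -- the white BFS call
  have hclnW : ∀ c : Int × Int, InR N c → gridGet grid c.1 c.2 = "W" →
      visGet (bfsA N grid vis bS bE "B").2 c.1 c.2 = 0 := by
    intro c hIn hcol
    by_contra hne
    rcases hAside c hIn hne with h | h | h
    · rw [hvis] at h
      exact h (visGet_replicate N.toNat c.1 c.2)
    · rw [hbS_col c h] at hcol
      exact absurd hcol (by decide)
    · rw [h] at hcol
      exact absurd hcol (by decide)
  obtain ⟨hWiff, hWsh, hWside⟩ := bfsA_correct N grid "W" wS wE (bfsA N grid vis bS bE "B").2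
    hAsh hclnW hwS_in hwS_col hwS_len
  have hBWiff := connectedB_iff N grid "W" wS wEL hwS_in
  have hbool2 : (bfsA N grid (bfsA N grid vis bS bE "B").2 wS wE "W").1 =
      connectedB N grid wS wEL "W" := by
    cases h1 : (bfsA N grid (bfsA N grid vis bS bE "B").2 wS wE "W").1
    · cases h2 : connectedB N grid wS wEL "W"
      · rfl
      · exfalso
        obtain ⟨e, he, hr⟩ := hBWiff.mp h2
        have := hWiff.mpr ⟨e, (hwE_mem e).mpr he, hr⟩
        rw [h1] at this
        exact Bool.false_ne_true this
    · obtain ⟨e, he, hr⟩ := hWiff.mp h1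
      exact (hBWiff.mpr ⟨e, (hwE_mem e).mp he, hr⟩).symm
  rw [hbool1, hbool2]

-- ===== VERDICT (by name: the statement is the Claim_ definition above) =====
theorem solve_spec : Claim_equal_solve := by
  intro N grid _ _
  unfold Spec_solve
  exact solve_eq N grid
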